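-- pv_equiv track=rewrite | github.com/papulo79/slm-ocr-invoices | gepa/proposer.py | _build_error_summary
-- ===== SOURCE A (Python) =====
-- from collections import Counter
--
-- def _build_error_summary(issues: list[dict]) -> str:
--     """Resumen legible de los errores del dataset para el meta-prompt."""
--     if not issues:
--         return "No se detectaron errores significativos."
--
--     type_counts: Counter = Counter()
--     examples: dict[str, list[str]] = {}
--
--     for issue in issues:
--         issue_type = issue.get("subtype") or issue.get("type", "unknown")
--         type_counts[issue_type] += 1
--         if issue_type not in examples:
--             examples[issue_type] = []
--         if len(examples[issue_type]) < 3: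
--             field = issue.get("field", "")
--             expected = issue.get("expected", "")
--             actual = issue.get("actual", "")
--             examples[issue_type].append(
--                 f'  • Campo "{field}": '
--                 f'esperado="{expected}" → obtenido="{actual}"'
--             )
--
--     lines = []
--     for issue_type, count in type_counts.most_common():
--         lines.append(f"\n[{issue_type.upper()}] — {count} ocurrencia(s):")
--         lines.extend(examples.get(issue_type, []))
--
--     return "\n".join(lines)
-- ===== SOURCE B (Python) =====
-- def _build_error_summary(issues: list[dict]) -> str:
--     """Resumen legible de los errores del dataset para el meta-prompt."""
--     if not issues:
--         return "No se detectaron errores significativos."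
--
--     # Stage 1: just the per-issue type labels, positionally aligned with `issues`.
--     types = [i.get("subtype") or i.get("type", "unknown") for i in issues]
--
--     # Stage 2: no grouping dict at all — distinct labels in first-appearance order
--     # (dict.fromkeys), stably sorted by their total count (reproduces most_common),
--     # and for each label the first 3 matching issues are found by re-scanning.
--     lines = []
--     for t in sorted(dict.fromkeys(types), key=types.count, reverse=True):
--         lines.append(f"\n[{t.upper()}] — {types.count(t)} ocurrencia(s):")
--         lines.extend([
--             f'  • Campo "{i.get("field", "")}": '
--             f'esperado="{i.get("expected", "")}" → obtenido="{i.get("actual", "")}"'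
--             for i, ty in zip(issues, types) if ty == t
--         ][:3])
--     return "\n".join(lines)
-- ===== Notes on version B (the rewrite author's own statement) =====
-- stated objective: alternative
-- what changed: Drops A's single pass with two parallel dicts (Counter + capped examples dict) entirely: B first extracts the flat list of type labels, then for each distinct label (dict.fromkeys, stably sorted by types.count descending, reproducing most_common) it recomputes the count and re-scans the issues for the first 3 matching examples, trading A's O(n) dict bookkeeping for dict-free staged nested scans.
import Mathlib
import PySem

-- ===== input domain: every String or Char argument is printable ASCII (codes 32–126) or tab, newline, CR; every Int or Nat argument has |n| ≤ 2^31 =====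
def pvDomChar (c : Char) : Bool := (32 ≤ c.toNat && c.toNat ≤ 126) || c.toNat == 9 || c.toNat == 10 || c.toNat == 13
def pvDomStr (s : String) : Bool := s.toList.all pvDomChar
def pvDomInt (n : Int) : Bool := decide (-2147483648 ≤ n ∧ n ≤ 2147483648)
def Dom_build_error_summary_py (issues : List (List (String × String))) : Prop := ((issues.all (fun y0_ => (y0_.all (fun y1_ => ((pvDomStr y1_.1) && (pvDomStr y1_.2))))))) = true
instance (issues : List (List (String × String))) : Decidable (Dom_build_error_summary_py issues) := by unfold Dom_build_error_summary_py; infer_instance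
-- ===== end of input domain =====

-- B drops A's single pass with two parallel dicts (Counter + capped examples dict): it extracts the flat
-- label list, then per distinct label recomputes the count and re-scans for the first 3 examples (objective: alternative).

-- ===== PORT A =====
-- issue.get("subtype") or issue.get("type", "unknown")  ('or' takes the second operand when the first is None or "")
def pvIssueTypeA (d : PySem.Dict String String) : String :=
  match d.get? "subtype" with
  | some s => if s = "" then d.getD "type" "unknown" else s
  | none => d.getD "type" "unknown"

-- the f-string for one example line (string concatenation of literal pieces is exact here)
def pvExampleA (d : PySem.Dict String String) : String :=
  "  • Campo \"" ++ d.getD "field" "" ++ "\": esperado=\"" ++ d.getD "expected" ""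
    ++ "\" → obtenido=\"" ++ d.getD "actual" "" ++ "\""

-- body of A's first loop: bump the Counter, seed examples[t], append an example while len < 3
def pvStepA (st : PySem.Dict String Int × PySem.Dict String (List String))
    (issue : List (String × String)) :
    PySem.Dict String Int × PySem.Dict String (List String) :=
  let d := PySem.Dict.mk issue
  let t := pvIssueTypeA d
  let counts := st.1.modify t 0 (· + 1)
  let examples := if st.2.contains t then st.2 else st.2.insert t []
  let examples := if (examples.getD t []).length < 3
    then examples.insert t (examples.getD t [] ++ [pvExampleA d]) else examples
  (counts, examples)

-- A's second loop: one header line per most_common() entry, then examples.get(t, [])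
def pvLinesA (examples : PySem.Dict String (List String)) (items : List (String × Int)) :
    List String :=
  items.foldl
    (fun lines p =>
      (lines ++ ["\n[" ++ PySem.Str.upper p.1 ++ "] — " ++ PySem.Int.toStr p.2 ++ " ocurrencia(s):"])
        ++ examples.getD p.1 []) []

def build_error_summary_py (issues : List (List (String × String))) : String :=
  if issues = [] then "No se detectaron errores significativos."
  else
    let st := issues.foldl pvStepA (PySem.Dict.empty, PySem.Dict.empty)
    -- Counter.most_common() = sorted(items, key=itemgetter(1), reverse=True), a stable sort
    PySem.Str.join "\n" (pvLinesA st.2 (PySem.List.sorted st.1.items (fun p => p.2) true))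

-- ===== PORT B =====
def pvIssueTypeB (d : PySem.Dict String String) : String :=
  match d.get? "subtype" with
  | some s => if s = "" then d.getD "type" "unknown" else s
  | none => d.getD "type" "unknown"

def pvExampleB (d : PySem.Dict String String) : String :=
  "  • Campo \"" ++ d.getD "field" "" ++ "\": esperado=\"" ++ d.getD "expected" ""
    ++ "\" → obtenido=\"" ++ d.getD "actual" "" ++ "\""

-- stage 1: the per-issue labels, positionally aligned with issues
def pvTypesB (issues : List (List (String × String))) : List String :=
  issues.map (fun i => pvIssueTypeB (PySem.Dict.mk i))

-- body of B's output loop: header from types.count(t), then the first 3 matches of a re-scan over zip(issues, types)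
def pvLineB (issues : List (List (String × String))) (types : List String)
    (lines : List String) (t : String) : List String :=
  (lines ++ ["\n[" ++ PySem.Str.upper t ++ "] — " ++ PySem.Int.toStr ((types.count t : Nat) : Int)
      ++ " ocurrencia(s):"])
    ++ (((issues.zip types).filter (fun p => p.2 == t)).map
        (fun p => pvExampleB (PySem.Dict.mk p.1))).take 3

def build_error_summary_py_alt (issues : List (List (String × String))) : String :=
  if issues = [] then "No se detectaron errores significativos."
  else
    let types := pvTypesB issues
    -- sorted(dict.fromkeys(types), key=types.count, reverse=True): dict.fromkeys = PySem.List.dedup, a stable sort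
    PySem.Str.join "\n"
      ((PySem.List.sorted (PySem.List.dedup types) (fun t => types.count t) true).foldl
        (pvLineB issues types) [])

-- ===== PRECONDITION & SPEC =====
def Spec_build_error_summary_py (issues : List (List (String × String))) (out : String) : Prop := out = build_error_summary_py_alt issues
instance (issues : List (List (String × String))) (out : String) : Decidable (Spec_build_error_summary_py issues out) := by unfold Spec_build_error_summary_py; infer_instance

-- ===== CLAIM (what is proved, stated in full; the proofs are below) =====
def Claim_equal_build_error_summary_py : Prop := ∀ (issues : List (List (String × String))), Dom_build_error_summary_py issues → Spec_build_error_summary_py issues (build_error_summary_py issues)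

-- ===== LEMMAS AND PROOFS =====

-- the label / formatted line of one issue, and the closed form of A's examples dict entry
def pvF (i : List (String × String)) : String := pvIssueTypeA (PySem.Dict.mk i)
def pvFmt (i : List (String × String)) : String := pvExampleA (PySem.Dict.mk i)
def pvExs (l : List (List (String × String))) (t : String) : List String :=
  ((l.filter (fun i => pvF i == t)).map pvFmt).take 3
-- A's counts-dict entry for a label
def pvFC (tys : List String) (t : String) : String × Int := (t, (tys.count t : Int))

-- the examples component of A's loop body (A's pair step projected)
def pvStepE (e : PySem.Dict String (List String)) (issue : List (String × String)) :
    PySem.Dict String (List String) :=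
  let e1 := if e.contains (pvF issue) then e else e.insert (pvF issue) []
  if (e1.getD (pvF issue) []).length < 3
    then e1.insert (pvF issue) (e1.getD (pvF issue) [] ++ [pvFmt issue]) else e1

lemma pvFoldl_proj (l : List (List (String × String)))
    (c : PySem.Dict String Int) (e : PySem.Dict String (List String)) :
    l.foldl pvStepA (c, e)
      = (l.foldl (fun d i => d.modify (pvF i) 0 (· + 1)) c, l.foldl pvStepE e) := by
  induction l generalizing c e with
  | nil => rfl
  | cons x xs ih =>
    simp only [List.foldl_cons]
    rw [show pvStepA (c, e) x
        = (c.modify (pvF x) 0 (· + 1), pvStepE e x) from rfl, ih]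

-- A's counts dict is Counter(types)
lemma pvCounts_eq (l : List (List (String × String))) :
    l.foldl (fun d i => d.modify (pvF i) 0 (· + 1)) PySem.Dict.empty
      = PySem.Dict.counter (l.map pvF) := by
  rw [PySem.Dict.counter_eq_foldl, List.foldl_map]

-- closed form of A's examples dict: one entry per distinct label, first 3 formatted matches
lemma pvExItems (l : List (List (String × String))) :
    (l.foldl pvStepE PySem.Dict.empty).items
      = (PySem.Set.ofList (l.map pvF)).map (fun t => (t, pvExs l t)) := by
  induction l using List.reverseRecOn with
  | nil => rfl
  | append_singleton l x ih =>
    have hkeys : (l.foldl pvStepE PySem.Dict.empty).keys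
        = PySem.Set.ofList (l.map pvF) := by
      show ((l.foldl pvStepE PySem.Dict.empty).items.map (·.1)) = _
      rw [ih, List.map_map, show ((fun p : String × List String => p.1) ∘ fun t => (t, pvExs l t)) = id from rfl,
        List.map_id]
    have hnd : (l.foldl pvStepE PySem.Dict.empty).keys.Nodup := by
      rw [hkeys]; exact PySem.Set.nodup_ofList _
    set e := l.foldl pvStepE PySem.Dict.empty with he
    set t := pvF x with ht
    have hcont : e.contains t = decide (t ∈ l.map pvF) := by
      rw [PySem.Dict.contains_eq_decide_mem_keys, hkeys]
      simp [PySem.Set.mem_ofList]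
    have hmapF : (l ++ [x]).map pvF = l.map pvF ++ [t] := by simp [ht]
    have hK : PySem.Set.ofList ((l ++ [x]).map pvF)
        = PySem.Set.add (PySem.Set.ofList (l.map pvF)) t := by
      rw [hmapF, PySem.Set.ofList_append_singleton]
    have hfold : (l ++ [x]).foldl pvStepE PySem.Dict.empty = pvStepE e x := by
      rw [List.foldl_append]; rfl
    have hExsNe : ∀ t', t' ≠ t → pvExs (l ++ [x]) t' = pvExs l t' := by
      intro t' hne
      unfold pvExs
      rw [List.filter_append]
      have hb : (pvF x == t') = false := by
        rw [← ht]; exact beq_eq_false_iff_ne.mpr (Ne.symm hne)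
      have : [x].filter (fun i => pvF i == t') = [] := by simp [List.filter, hb]
      rw [this, List.append_nil]
    by_cases hmem : t ∈ l.map pvF
    · -- t seen before: dict updated in place, set unchanged
      have hc : e.contains t = true := by rw [hcont]; simpa using hmem
      have hget : e.getD t [] = pvExs l t := by
        apply PySem.Dict.getD_of_mem_items e _ hnd
        rw [ih]
        exact List.mem_map_of_mem (by simpa [PySem.Set.mem_ofList] using hmem)
      have hstep : pvStepE e x
          = if (pvExs l t).length < 3 then e.insert t (pvExs l t ++ [pvFmt x]) else e := by
        unfold pvStepE
        rw [← ht, hc]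
        simp only [if_true, hget]
      have hmatch : pvExs (l ++ [x]) t
          = if (pvExs l t).length < 3 then pvExs l t ++ [pvFmt x] else pvExs l t := by
        unfold pvExs
        rw [List.filter_append]
        have : [x].filter (fun i => pvF i == t) = [x] := by simp [List.filter, ← ht]
        rw [this, List.map_append]
        simp only [List.map_cons, List.map_nil]
        set m := (l.filter (fun i => pvF i == t)).map pvFmt with hm
        by_cases h3 : m.length < 3
        · rw [if_pos (by simp [List.length_take]; omega)]
          rw [List.take_of_length_le (by simp; omega), List.take_of_length_le (by omega)]
        · rw [if_neg (by simp [List.length_take]; omega),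
            List.take_append_of_le_length (by omega)]
      rw [hfold, hstep, hK, PySem.Set.add_of_mem (by simpa [PySem.Set.mem_ofList] using hmem)]
      by_cases h3 : (pvExs l t).length < 3
      · rw [if_pos h3, PySem.Dict.items_insert_of_contains e _ hc, ih, List.map_map]
        apply List.map_congr_left
        intro k hk
        by_cases hkt : k = t
        · simp only [Function.comp_apply, hkt, beq_self_eq_true, if_true, hmatch, if_pos h3]
        · simp only [Function.comp_apply, beq_iff_eq, hkt, if_false, hExsNe k hkt]
      · rw [if_neg h3, ih]
        apply List.map_congr_left
        intro k hk
        by_cases hkt : k = t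
        · rw [hkt, hmatch, if_neg h3]
        · rw [hExsNe k hkt]
    · -- t is new: appended to both the dict and the set
      have hc : e.contains t = false := by rw [hcont]; simpa using hmem
      have hstep : pvStepE e x = e.insert t [pvFmt x] := by
        unfold pvStepE
        rw [← ht, hc]
        simp only [Bool.false_eq_true, if_false, PySem.Dict.getD_insert_self, List.length_nil,
          Nat.zero_lt_succ, if_true, List.nil_append, PySem.Dict.insert_insert_self]
      have hmatchT : pvExs (l ++ [x]) t = [pvFmt x] := by
        unfold pvExs
        rw [List.filter_append]
        have h1 : l.filter (fun i => pvF i == t) = [] := by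
          rw [List.filter_eq_nil_iff]
          intro i hi
          simp only [beq_iff_eq]
          intro hcontra
          exact hmem (hcontra ▸ List.mem_map_of_mem hi)
        have h2 : [x].filter (fun i => pvF i == t) = [x] := by simp [List.filter, ← ht]
        rw [h1, h2]
        rfl
      rw [hfold, hstep, hK, PySem.Set.add_of_not_mem (by simpa [PySem.Set.mem_ofList] using hmem),
        PySem.Dict.items_insert_of_not_contains e _ hc, ih, List.map_append]
      congr 1
      · apply List.map_congr_left
        intro k hk
        have hkt : k ≠ t := by
          intro h
          exact hmem (by simpa [PySem.Set.mem_ofList, h] using hk)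
        rw [hExsNe k hkt]
      · simp [hmatchT]

-- a stable insertion commutes with relabelling when the comparator is preserved
lemma pvInsertBy_map {α β : Type} (f : α → β) (ba : β → β → Bool) (bb : α → α → Bool)
    (h : ∀ x y, ba (f x) (f y) = bb x y) (x : α) (l : List α) :
    PySem.List.insertBy ba (f x) (l.map f) = (PySem.List.insertBy bb x l).map f := by
  induction l with
  | nil => simp [PySem.List.insertBy]
  | cons y t ih =>
    simp only [List.map_cons, PySem.List.insertBy, h x y]
    by_cases hxy : bb x y = true <;> simp [hxy, ih]

lemma pvFoldl_insertBy_map {α β : Type} (f : α → β) (ba : β → β → Bool) (bb : α → α → Bool)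
    (h : ∀ x y, ba (f x) (f y) = bb x y) (l : List α) :
    ∀ acc : List α,
      (l.map f).foldl (fun acc x => PySem.List.insertBy ba x acc) (acc.map f)
        = (l.foldl (fun acc x => PySem.List.insertBy bb x acc) acc).map f := by
  induction l with
  | nil => intro acc; simp
  | cons y t ih =>
    intro acc
    simp only [List.map_cons, List.foldl_cons]
    rw [pvInsertBy_map f ba bb h y acc]
    exact ih _

-- most_common over Counter items = (sorted labels by count).map (label, count)
lemma pvSorted_map (tys : List String) (K : List String) :
    PySem.List.sorted (K.map (pvFC tys)) (fun p => p.2) true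
      = (PySem.List.sorted K (fun t => tys.count t) true).map (pvFC tys) := by
  rw [PySem.List.sorted_rev_eq_foldl_insertBy, PySem.List.sorted_rev_eq_foldl_insertBy]
  have h : ∀ x y : String,
      (decide ((pvFC tys y).2 < (pvFC tys x).2)) = decide (tys.count y < tys.count x) := by
    intro x y
    simp [pvFC]
  simpa using pvFoldl_insertBy_map (pvFC tys) _ _ (fun x y => h x y) K []

-- B's re-scan over zip(issues, types) finds exactly the matching issues
lemma pvZipFilter (l : List (List (String × String))) (t : String) :
    (l.zip (l.map pvF)).filter (fun p => p.2 == t)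
      = (l.filter (fun i => pvF i == t)).map (fun i => (i, pvF i)) := by
  induction l with
  | nil => rfl
  | cons x xs ih =>
    simp only [List.map_cons, List.zip_cons_cons, List.filter_cons]
    by_cases hx : (pvF x == t) = true
    · simp only [hx, if_true, ih, List.map_cons]
    · simp only [hx, Bool.false_eq_true, if_false, ih]

-- ===== VERDICT (by name: the statement is the Claim_ definition above) =====
theorem build_error_summary_py_spec : Claim_equal_build_error_summary_py := by
  intro issues _hdom
  show build_error_summary_py issues = build_error_summary_py_alt issues
  unfold build_error_summary_py build_error_summary_py_alt
  by_cases h : issues = []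
  · simp [h]
  · simp only [if_neg h]
    have hTB : pvTypesB issues = issues.map pvF := rfl
    rw [pvFoldl_proj, pvCounts_eq, hTB]
    set tys := issues.map pvF with htys
    set K := PySem.Set.ofList tys with hKdef
    have hitems : (PySem.Dict.counter tys).items = K.map (pvFC tys) := by
      rw [PySem.Dict.items_counter]; rfl
    have hdedup : PySem.List.dedup tys = K := PySem.List.dedup_eq_ofList tys
    rw [hitems, hdedup, pvSorted_map]
    apply congrArg (PySem.Str.join "\n")
    unfold pvLinesA
    rw [List.foldl_map]
    apply PySem.List.foldl_congr_mem
    intro acc t ht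
    have htK : t ∈ K := (PySem.List.mem_sorted _ _ _ _).mp ht
    -- the examples dict lookup is the first-3 re-scan
    have hnd : (issues.foldl pvStepE PySem.Dict.empty).keys.Nodup := by
      show ((issues.foldl pvStepE PySem.Dict.empty).items.map (·.1)).Nodup
      rw [pvExItems, List.map_map,
        show ((fun p : String × List String => p.1) ∘ fun t => (t, pvExs issues t)) = id from rfl,
        List.map_id]
      exact PySem.Set.nodup_ofList _
    have hget : (issues.foldl pvStepE PySem.Dict.empty).getD t [] = pvExs issues t := by
      apply PySem.Dict.getD_of_mem_items _ _ hnd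
      rw [pvExItems]
      exact List.mem_map_of_mem htK
    unfold pvLineB
    simp only [pvFC]
    rw [hget, htys, pvZipFilter]
    unfold pvExs
    simp only [List.map_map]
    rfl
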